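-- pv_equiv track=rewrite | github.com/JiaoLab2021/PHap | scripts/phap_cluster.py | get_link_list
-- ===== SOURCE A (Python) =====
-- from collections import defaultdict
--
-- def get_link_list(dic_pair_hic):
--     ''' 将 contig pair 的 Hi-C 信号，转换为 contig 的 Hi-C 信号 '''
--     dic_contig_hic = defaultdict(list)
--     ## 处理 contig pair links dic
--     for (contig1, contig2), links in dic_pair_hic.items():
--         dic_contig_hic[contig1].append((contig2, links))
--         if contig1 != contig2:
--             dic_contig_hic[contig2].append((contig1, links))
--
--     # 对每个 contig 的 links 按照从大到小排序
--     for contig, links in dic_contig_hic.items():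
--         links.sort(key=lambda x: x[1], reverse=True)
--
--     return dic_contig_hic
-- ===== SOURCE B (Python) =====
-- from collections import defaultdict
--
-- def get_link_list(dic_pair_hic):
--     ''' 将 contig pair 的 Hi-C 信号，转换为 contig 的 Hi-C 信号 '''
--     # one flat list of (contig, neighbor, links) entries, both directions
--     flat = []
--     for (contig1, contig2), links in dic_pair_hic.items():
--         flat.append((contig1, contig2, links))
--         if contig1 != contig2:
--             flat.append((contig2, contig1, links))
--     # register every contig in first-appearance order (fixes the dict key order)
--     dic_contig_hic = defaultdict(list)
--     for contig, _, _ in flat: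
--         dic_contig_hic.setdefault(contig, [])
--     # ONE global stable sort by links descending, then group; stability keeps
--     # ties in original insertion order, so each contig's list comes out sorted
--     flat.sort(key=lambda x: x[2], reverse=True)
--     for contig, neighbor, links in flat:
--         dic_contig_hic[contig].append((neighbor, links))
--     return dic_contig_hic
-- ===== Notes on version B (the rewrite author's own statement) =====
-- stated objective: alternative
-- what changed: Replaces A's per-contig in-place sorts (one sort for every dict entry) by building one flat (contig, neighbor, links) list, sorting it once globally by links descending with Python's stable sort, and grouping the sorted list into a fresh defaultdict; sort stability reproduces each contig's exact tie order.
import Mathlib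
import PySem

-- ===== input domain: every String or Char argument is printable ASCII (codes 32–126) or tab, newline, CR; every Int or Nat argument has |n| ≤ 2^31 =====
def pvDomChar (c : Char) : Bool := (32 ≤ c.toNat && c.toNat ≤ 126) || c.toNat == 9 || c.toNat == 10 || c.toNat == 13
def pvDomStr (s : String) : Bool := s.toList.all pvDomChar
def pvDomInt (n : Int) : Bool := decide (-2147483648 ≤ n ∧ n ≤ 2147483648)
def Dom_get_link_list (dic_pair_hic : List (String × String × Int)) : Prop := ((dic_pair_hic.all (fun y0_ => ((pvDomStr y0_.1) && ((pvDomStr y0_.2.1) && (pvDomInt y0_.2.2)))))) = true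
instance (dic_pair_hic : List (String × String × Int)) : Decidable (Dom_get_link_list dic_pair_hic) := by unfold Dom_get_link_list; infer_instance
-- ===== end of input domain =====

-- B replaces A's one-sort-per-contig pass by a single global stable sort of a flat
-- (contig, neighbor, links) list followed by one grouping pass (alternative decomposition).

-- ===== PORT A =====
def get_link_list (dic_pair_hic : List (String × String × Int)) : List (String × List (String × Int)) :=
  -- dic_contig_hic = defaultdict(list); for (c1, c2), links in dic_pair_hic.items(): append (both directions)
  let dic_contig_hic : PySem.Dict String (List (String × Int)) :=
    dic_pair_hic.foldl (fun d p =>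
      let d := d.modify p.1 [] (fun l => l ++ [(p.2.1, p.2.2)])
      if p.1 ≠ p.2.1 then d.modify p.2.1 [] (fun l => l ++ [(p.1, p.2.2)]) else d)
      PySem.Dict.empty
  -- for contig, links in dic_contig_hic.items(): links.sort(key=lambda x: x[1], reverse=True)
  dic_contig_hic.items.map (fun q => (q.1, PySem.List.sorted q.2 (fun x => x.2) true))

-- ===== PORT B =====
def get_link_list_alt (dic_pair_hic : List (String × String × Int)) : List (String × List (String × Int)) :=
  -- flat = []; for (c1, c2), links in dic_pair_hic.items(): flat.append(...) (both directions)
  let flat : List (String × String × Int) :=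
    dic_pair_hic.foldl (fun acc p =>
      let acc := acc ++ [(p.1, p.2.1, p.2.2)]
      if p.1 ≠ p.2.1 then acc ++ [(p.2.1, p.1, p.2.2)] else acc) []
  -- dic_contig_hic = defaultdict(list); for contig, _, _ in flat: dic_contig_hic.setdefault(contig, [])
  let dic_contig_hic : PySem.Dict String (List (String × Int)) :=
    flat.foldl (fun d t => d.setdefault t.1 []) PySem.Dict.empty
  -- flat.sort(key=lambda x: x[2], reverse=True)
  let flat := PySem.List.sorted flat (fun t => t.2.2) true
  -- for contig, neighbor, links in flat: dic_contig_hic[contig].append((neighbor, links))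
  let dic_contig_hic :=
    flat.foldl (fun d t => d.modify t.1 [] (fun l => l ++ [(t.2.1, t.2.2)])) dic_contig_hic
  dic_contig_hic.items

-- ===== PRECONDITION & SPEC =====
def Spec_get_link_list (dic_pair_hic : List (String × String × Int)) (out : List (String × List (String × Int))) : Prop := out = get_link_list_alt dic_pair_hic
instance (dic_pair_hic : List (String × String × Int)) (out : List (String × List (String × Int))) : Decidable (Spec_get_link_list dic_pair_hic out) := by unfold Spec_get_link_list; infer_instance

-- ===== CLAIM (what is proved, stated in full; the proofs are below) =====
def Claim_equal_get_link_list : Prop := ∀ (dic_pair_hic : List (String × String × Int)), Dom_get_link_list dic_pair_hic → Spec_get_link_list dic_pair_hic (get_link_list dic_pair_hic)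

-- ===== LEMMAS AND PROOFS =====

-- the 1-or-2 flat entries produced by one input pair
def glEnt (p : String × String × Int) : List (String × String × Int) :=
  (p.1, p.2.1, p.2.2) :: (if p.1 ≠ p.2.1 then [(p.2.1, p.1, p.2.2)] else [])

-- B's flat-building loop is the flatMap of glEnt
lemma gl_flat_eq (xs : List (String × String × Int)) (acc : List (String × String × Int)) :
    xs.foldl (fun acc p =>
      let acc := acc ++ [(p.1, p.2.1, p.2.2)]
      if p.1 ≠ p.2.1 then acc ++ [(p.2.1, p.1, p.2.2)] else acc) acc
    = acc ++ xs.flatMap glEnt := by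
  induction xs generalizing acc with
  | nil => simp
  | cons p xs ih =>
    simp only [List.foldl_cons, List.flatMap_cons, ih, glEnt]
    split_ifs <;> simp

-- A's grouping loop is the single-modify grouping loop over the flat list
lemma gl_A_fold_eq (xs : List (String × String × Int)) (d : PySem.Dict String (List (String × Int))) :
    xs.foldl (fun d p =>
      let d := d.modify p.1 [] (fun l => l ++ [(p.2.1, p.2.2)])
      if p.1 ≠ p.2.1 then d.modify p.2.1 [] (fun l => l ++ [(p.1, p.2.2)]) else d) d
    = (xs.flatMap glEnt).foldl
        (fun d t => d.modify t.1 [] (fun l => l ++ [(t.2.1, t.2.2)])) d := by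
  induction xs generalizing d with
  | nil => simp
  | cons p xs ih =>
    simp only [List.foldl_cons, List.flatMap_cons, List.foldl_append, ih, glEnt]
    split_ifs <;> simp

-- the seeding loop: every lookup with default [] is unchanged
lemma gl_seed_getD (l : List (String × String × Int))
    (d : PySem.Dict String (List (String × Int))) (c : String) :
    (l.foldl (fun d t => d.setdefault t.1 []) d).getD c [] = d.getD c [] := by
  induction l generalizing d with
  | nil => rfl
  | cons t l ih =>
    simp only [List.foldl_cons, ih]
    by_cases h : c = t.1
    · rw [h]; exact PySem.Dict.getD_setdefault_self d t.1 [] []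
    · rw [PySem.Dict.getD_eq_get?_getD, PySem.Dict.get?_setdefault_of_ne d [] h,
        ← PySem.Dict.getD_eq_get?_getD]

-- Dict.contains agrees with Set/List contains on the keys list
lemma gl_contains_keys (d : PySem.Dict String (List (String × Int))) (k : String) :
    PySem.Set.contains d.keys k = d.contains k := by
  rw [PySem.Dict.contains_eq_decide_mem_keys]
  simp [PySem.Set.contains]

-- the seeding loop inserts exactly the fresh keys, in first-appearance order
lemma gl_seed_keys (l : List (String × String × Int))
    (d : PySem.Dict String (List (String × Int))) :
    (l.foldl (fun d t => d.setdefault t.1 []) d).keys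
    = PySem.Set.update d.keys (l.map (fun t => t.1)) := by
  induction l generalizing d with
  | nil => rfl
  | cons t l ih =>
    simp only [List.foldl_cons, List.map_cons, PySem.Set.update, ih]
    congr 1
    rw [PySem.Dict.keys_setdefault]
    simp only [PySem.Set.add, gl_contains_keys]

lemma gl_update_of_subset (l : List String) (s : PySem.Set String)
    (h : ∀ x ∈ l, x ∈ s) : PySem.Set.update s l = s := by
  induction l generalizing s with
  | nil => rfl
  | cons x l ih =>
    simp only [PySem.Set.update, List.foldl_cons]
    rw [PySem.Set.add_of_mem (h x (by simp))]
    exact ih s (fun y hy => h y (by simp [hy]))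

-- ----- stable sort: insertBy preserves descending order, commutes with filter and map -----

lemma gl_pairwise_insertBy {α κ : Type} [LinearOrder κ] (key : α → κ) (x : α) (ys : List α)
    (h : ys.Pairwise (fun a b => key b ≤ key a)) :
    (PySem.List.insertBy (fun a b => decide (key b < key a)) x ys).Pairwise
      (fun a b => key b ≤ key a) := by
  induction ys with
  | nil => simp [PySem.List.insertBy]
  | cons y ys ih =>
    rw [List.pairwise_cons] at h
    simp only [PySem.List.insertBy]
    split_ifs with hb
    · refine List.Pairwise.cons ?_ (List.Pairwise.cons h.1 h.2)
      intro z hz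
      rcases List.mem_cons.mp hz with hz | hz
      · exact hz ▸ le_of_lt (by simpa using hb)
      · exact le_trans (h.1 z hz) (le_of_lt (by simpa using hb))
    · refine List.Pairwise.cons ?_ (ih h.2)
      intro z hz
      rw [PySem.List.mem_insertBy] at hz
      rcases hz with hz | hz
      · rw [hz]; simpa using hb
      · exact h.1 z hz

lemma gl_filter_insertBy {α κ : Type} [LinearOrder κ] (key : α → κ) (p : α → Bool)
    (x : α) (ys : List α) (h : ys.Pairwise (fun a b => key b ≤ key a)) :
    (PySem.List.insertBy (fun a b => decide (key b < key a)) x ys).filter p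
    = if p x then PySem.List.insertBy (fun a b => decide (key b < key a)) x (ys.filter p)
      else ys.filter p := by
  induction ys with
  | nil =>
    by_cases hpx : p x = true <;> simp [PySem.List.insertBy, hpx]
  | cons y ys ih =>
    rw [List.pairwise_cons] at h
    by_cases hb : key y < key x
    · -- x is inserted right here
      rw [show PySem.List.insertBy (fun a b => decide (key b < key a)) x (y :: ys)
          = x :: y :: ys by simp [PySem.List.insertBy, hb]]
      have hins : ∀ zs : List α, (∀ z ∈ zs, z ∈ y :: ys) →
          PySem.List.insertBy (fun a b => decide (key b < key a)) x zs = x :: zs := by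
        intro zs hz
        cases zs with
        | nil => rfl
        | cons z zs =>
          have hzle : key z ≤ key y := by
            rcases List.mem_cons.mp (hz z (by simp)) with hz' | hz'
            · exact le_of_eq (by rw [hz'])
            · exact h.1 z hz'
          simp [PySem.List.insertBy, lt_of_le_of_lt hzle hb]
      by_cases hpx : p x = true
      · rw [if_pos hpx, hins (List.filter p (y :: ys)) (fun z hz => (List.mem_filter.mp hz).1)]
        simp [List.filter_cons, hpx]
      · rw [if_neg hpx]
        simp [List.filter_cons, hpx]
    · -- recurse past y
      rw [show PySem.List.insertBy (fun a b => decide (key b < key a)) x (y :: ys)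
          = y :: PySem.List.insertBy (fun a b => decide (key b < key a)) x ys by
        simp [PySem.List.insertBy, hb]]
      simp only [List.filter_cons]
      rw [ih h.2]
      by_cases hpy : p y = true <;> by_cases hpx : p x = true <;>
        simp [hpy, hpx, PySem.List.insertBy, hb]

lemma gl_filter_sortfold {α κ : Type} [LinearOrder κ] (key : α → κ) (p : α → Bool)
    (xs acc : List α) (hacc : acc.Pairwise (fun a b => key b ≤ key a)) :
    (xs.foldl (fun acc x => PySem.List.insertBy (fun a b => decide (key b < key a)) x acc) acc).filter p
    = (xs.filter p).foldl (fun acc x => PySem.List.insertBy (fun a b => decide (key b < key a)) x acc)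
        (acc.filter p) := by
  induction xs generalizing acc with
  | nil => rfl
  | cons x xs ih =>
    simp only [List.foldl_cons, List.filter_cons]
    rw [ih _ (gl_pairwise_insertBy key x acc hacc), gl_filter_insertBy key p x acc hacc]
    split_ifs <;> rfl

-- filtering commutes with Python's stable descending sort
lemma gl_filter_sorted {α κ : Type} [LinearOrder κ] (key : α → κ) (p : α → Bool) (xs : List α) :
    (PySem.List.sorted xs key true).filter p = PySem.List.sorted (xs.filter p) key true := by
  rw [PySem.List.sorted_rev_eq_foldl_insertBy, PySem.List.sorted_rev_eq_foldl_insertBy]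
  simpa using gl_filter_sortfold key p xs [] (by simp)

lemma gl_map_insertBy {α β κ : Type} [LinearOrder κ] (key : β → κ) (f : α → β)
    (x : α) (ys : List α) :
    (PySem.List.insertBy (fun a b => decide (key (f b) < key (f a))) x ys).map f
    = PySem.List.insertBy (fun a b => decide (key b < key a)) (f x) (ys.map f) := by
  induction ys with
  | nil => rfl
  | cons y ys ih =>
    simp only [PySem.List.insertBy, List.map_cons]
    split_ifs with hb
    · simp
    · simp [ih]

lemma gl_map_sortfold {α β κ : Type} [LinearOrder κ] (key : β → κ) (f : α → β)
    (xs acc : List α) :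
    (xs.foldl (fun acc x => PySem.List.insertBy (fun a b => decide (key (f b) < key (f a))) x acc) acc).map f
    = (xs.map f).foldl (fun acc x => PySem.List.insertBy (fun a b => decide (key b < key a)) x acc)
        (acc.map f) := by
  induction xs generalizing acc with
  | nil => rfl
  | cons x xs ih =>
    simp only [List.foldl_cons, List.map_cons, ih, gl_map_insertBy]

-- mapping off the sort key commutes with the stable descending sort
lemma gl_map_sorted {α β κ : Type} [LinearOrder κ] (key : β → κ) (f : α → β) (xs : List α) :
    (PySem.List.sorted xs (fun a => key (f a)) true).map f
    = PySem.List.sorted (xs.map f) key true := by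
  rw [PySem.List.sorted_rev_eq_foldl_insertBy, PySem.List.sorted_rev_eq_foldl_insertBy]
  simpa using gl_map_sortfold key f xs []

-- the crux: per-contig sort of the filtered flat list = filter of the globally sorted flat list
lemma gl_crux (F : List (String × String × Int)) (c : String) :
    PySem.List.sorted ((F.filter (fun t => t.1 == c)).map (fun t => t.2)) (fun x => x.2) true
    = ((PySem.List.sorted F (fun t => t.2.2) true).filter (fun t => t.1 == c)).map (fun t => t.2) := by
  rw [gl_filter_sorted (fun t : String × String × Int => t.2.2) (fun t => t.1 == c) F]
  exact (gl_map_sorted (fun x : String × Int => x.2) (fun t : String × String × Int => t.2) _).symm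

-- ===== VERDICT (by name: the statement is the Claim_ definition above) =====
theorem get_link_list_spec : Claim_equal_get_link_list := by
  unfold Claim_equal_get_link_list Spec_get_link_list
  intro xs _
  unfold get_link_list get_link_list_alt
  simp only [gl_flat_eq, gl_A_fold_eq, List.nil_append]
  set F := xs.flatMap glEnt with hF
  set S := PySem.List.sorted F (fun t => t.2.2) true with hS
  set dA : PySem.Dict String (List (String × Int)) :=
    F.foldl (fun d t => d.modify t.1 [] (fun l => l ++ [(t.2.1, t.2.2)])) PySem.Dict.empty with hdA
  set d0 : PySem.Dict String (List (String × Int)) :=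
    F.foldl (fun d t => d.setdefault t.1 []) PySem.Dict.empty with hd0
  set dB : PySem.Dict String (List (String × Int)) :=
    S.foldl (fun d t => d.modify t.1 [] (fun l => l ++ [(t.2.1, t.2.2)])) d0 with hdB
  have hempty : (PySem.Dict.empty : PySem.Dict String (List (String × Int))).keys = [] := rfl
  -- keys
  have hKA : dA.keys = PySem.Set.update [] (F.map (fun t => t.1)) := by
    rw [hdA, ← hempty]
    exact PySem.Dict.keys_foldl_modify_key F (fun t => t.1) []
      (fun d t l => l ++ [(t.2.1, t.2.2)]) PySem.Dict.empty
  have hK0 : d0.keys = PySem.Set.update [] (F.map (fun t => t.1)) := by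
    rw [hd0, ← hempty]; exact gl_seed_keys F PySem.Dict.empty
  have hKB : dB.keys = d0.keys := by
    rw [hdB]
    rw [PySem.Dict.keys_foldl_modify_key S (fun t => t.1) []
      (fun d t l => l ++ [(t.2.1, t.2.2)]) d0]
    apply gl_update_of_subset
    intro x hx
    rw [hK0, PySem.Set.mem_update]
    right
    have hperm : (S.map (fun t => t.1)).Perm (F.map (fun t => t.1)) :=
      (PySem.List.sorted_perm F (fun t => t.2.2) true).map _
    simpa using hperm.mem_iff.mp hx
  have hkeys : dA.keys = dB.keys := by rw [hKA, hKB, hK0]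
  have hndA : dA.keys.Nodup := by
    rw [hdA]
    exact PySem.Dict.nodup_keys_foldl_modify_key F (fun t => t.1) []
      (fun d t l => l ++ [(t.2.1, t.2.2)]) PySem.Dict.empty PySem.Dict.nodup_keys_empty
  have hndB : dB.keys.Nodup := by rw [← hkeys]; exact hndA
  -- values
  have hvA : ∀ c, dA.getD c [] = (F.filter (fun t => t.1 == c)).map (fun t => t.2) := by
    intro c
    have h1 : (F.foldl (fun d t => d.modify t.1 [] (fun l => l ++ [(t.2.1, t.2.2)]))
        (PySem.Dict.empty : PySem.Dict String (List (String × Int)))).getD c []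
        = (PySem.Dict.empty : PySem.Dict String (List (String × Int))).getD c []
          ++ (F.filter (fun t => t.1 == c)).map (fun t => t.2) :=
      PySem.Dict.getD_foldl_modify_append F PySem.Dict.empty c
    rw [hdA, h1]
    rfl
  have hvB : ∀ c, dB.getD c [] = (S.filter (fun t => t.1 == c)).map (fun t => t.2) := by
    intro c
    have h1 : (S.foldl (fun d t => d.modify t.1 [] (fun l => l ++ [(t.2.1, t.2.2)])) d0).getD c []
        = d0.getD c [] ++ (S.filter (fun t => t.1 == c)).map (fun t => t.2) :=
      PySem.Dict.getD_foldl_modify_append S d0 c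
    have h0 : d0.getD c [] = [] := by
      rw [hd0, gl_seed_getD]
      rfl
    rw [hdB, h1, h0, List.nil_append]
  -- assemble
  rw [PySem.Dict.items_eq_map_keys dA hndA [], PySem.Dict.items_eq_map_keys dB hndB [],
    ← hkeys, List.map_map]
  apply List.map_congr_left
  intro c _
  simp only [Function.comp_apply]
  rw [hvA c, hvB c, gl_crux F c]
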